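-- pv_equiv track=rewrite | github.com/CraigBuckmaster/ScriptureDeepDive | _tools/build_sqlite_loaders.py | _is_refuted
-- ===== SOURCE A (Python) =====
-- def _is_refuted(entry_texts, refuted_texts):
--     """Check if any of the entry's text representations match a refuted claim."""
--     for text in entry_texts:
--         if not text:
--             continue
--         for rt in refuted_texts:
--             if not rt:
--                 continue
--             if text.startswith(rt) or rt.startswith(text):
--                 return True
--     return False
-- ===== SOURCE B (Python) =====
-- def _is_refuted(entry_texts, refuted_texts):
--     """Check if any of the entry's text representations match a refuted claim."""
--     refuted = set()
--     prefixes = set()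
--     for rt in refuted_texts:
--         if rt:
--             refuted.add(rt)
--             for i in range(1, len(rt) + 1):
--                 prefixes.add(rt[:i])
--     for text in entry_texts:
--         if not text:
--             continue
--         if text in prefixes:
--             return True
--         for i in range(1, len(text) + 1):
--             if text[:i] in refuted:
--                 return True
--     return False
-- ===== Notes on version B (the rewrite author's own statement) =====
-- stated objective: alternative
-- what changed: Replaces the nested scan over all (entry, refuted) pairs with startswith tests by two hash sets built once from the refuted texts (the texts themselves and all their prefixes), after which each entry text is decided by set lookups on its prefixes; on match-heavy inputs A's early exit wins, so no speed is claimed.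
import Mathlib
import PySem

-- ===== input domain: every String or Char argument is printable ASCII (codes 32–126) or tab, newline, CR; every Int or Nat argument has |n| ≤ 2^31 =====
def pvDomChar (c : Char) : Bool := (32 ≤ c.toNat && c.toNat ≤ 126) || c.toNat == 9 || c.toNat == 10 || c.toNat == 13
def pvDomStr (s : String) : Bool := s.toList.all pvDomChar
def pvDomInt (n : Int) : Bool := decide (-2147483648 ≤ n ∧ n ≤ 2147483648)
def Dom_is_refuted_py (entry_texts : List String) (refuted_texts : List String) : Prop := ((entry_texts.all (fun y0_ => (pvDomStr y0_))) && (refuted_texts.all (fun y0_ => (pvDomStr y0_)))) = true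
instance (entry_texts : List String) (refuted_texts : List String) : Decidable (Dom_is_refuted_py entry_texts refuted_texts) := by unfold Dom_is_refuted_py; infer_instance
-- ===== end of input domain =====

-- B replaces A's all-pairs startswith scan by two sets built once from the refuted texts
-- (the texts themselves and all their prefixes), then decides each entry text by set
-- lookups on its prefixes (an alternative algorithm; no speed is claimed).

-- ===== PORT A =====
def is_refuted_py (entry_texts : List String) (refuted_texts : List String) : Bool :=
  entry_texts.any (fun text =>
    !(text == "") && refuted_texts.any (fun rt =>
      !(rt == "") && (PySem.Str.startswith text rt || PySem.Str.startswith rt text)))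

-- ===== PORT B =====
-- one iteration of Source B's first loop: add rt to `refuted` and all its prefixes rt[:i] to `prefixes`
def pvAltStep (st : PySem.Set String × PySem.Set String) (rt : String) :
    PySem.Set String × PySem.Set String :=
  if rt == "" then st
  else (PySem.Set.add st.1 rt,
        (PySem.List.pyRange 1 ((PySem.Str.len rt : Int) + 1) 1).foldl
          (fun p i => PySem.Set.add p (PySem.Str.slice rt none (some i))) st.2)

def is_refuted_py_alt (entry_texts : List String) (refuted_texts : List String) : Bool :=
  let st := refuted_texts.foldl pvAltStep (PySem.Set.empty, PySem.Set.empty)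
  entry_texts.any (fun text =>
    !(text == "") &&
      (PySem.Set.contains st.2 text ||
       (PySem.List.pyRange 1 ((PySem.Str.len text : Int) + 1) 1).any
         (fun i => PySem.Set.contains st.1 (PySem.Str.slice text none (some i)))))

-- ===== PRECONDITION & SPEC =====
def Spec_is_refuted_py (entry_texts : List String) (refuted_texts : List String) (out : Bool) : Prop := out = is_refuted_py_alt entry_texts refuted_texts
instance (entry_texts : List String) (refuted_texts : List String) (out : Bool) : Decidable (Spec_is_refuted_py entry_texts refuted_texts out) := by unfold Spec_is_refuted_py; infer_instance

-- ===== CLAIM (what is proved, stated in full; the proofs are below) =====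
def Claim_equal_is_refuted_py : Prop := ∀ (entry_texts : List String) (refuted_texts : List String), Dom_is_refuted_py entry_texts refuted_texts → Spec_is_refuted_py entry_texts refuted_texts (is_refuted_py entry_texts refuted_texts)

-- ===== LEMMAS AND PROOFS =====

-- s[:i] for 0 ≤ i is take
theorem pv_slice_toList (s : String) (i : Int) (hi : 0 ≤ i) :
    (PySem.Str.slice s none (some i)).toList = s.toList.take i.toNat := by
  simp [PySem.List.slice_to _ hi]

theorem pv_ne_empty_iff (s : String) : s ≠ "" ↔ s.toList ≠ [] := by
  rw [not_iff_not, ← String.toList_inj]; simp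

-- members of the first set built by the fold: the nonempty refuted texts seen so far
theorem pv_mem_fst (rs : List String) (st : PySem.Set String × PySem.Set String) (x : String) :
    x ∈ (rs.foldl pvAltStep st).1 ↔ x ∈ st.1 ∨ (x ∈ rs ∧ x ≠ "") := by
  induction rs generalizing st with
  | nil => simp
  | cons rt rs ih =>
    rw [List.foldl_cons, ih]
    by_cases h : rt = ""
    · rw [show pvAltStep st rt = st from by simp [pvAltStep, h]]
      simp only [List.mem_cons]
      constructor
      · tauto
      · rintro (hx | ⟨(rfl | hm), hne⟩) <;> tauto
    · rw [show (pvAltStep st rt).1 = PySem.Set.add st.1 rt from by simp [pvAltStep, h]]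
      rw [PySem.Set.mem_add]
      simp only [List.mem_cons]
      constructor
      · rintro ((hx | rfl) | ⟨hm, hne⟩) <;> tauto
      · rintro (hx | ⟨(rfl | hm), hne⟩) <;> tauto

-- members of the second set: the slices rt[:i], 1 ≤ i ≤ len rt, of nonempty refuted texts
theorem pv_mem_snd (rs : List String) (st : PySem.Set String × PySem.Set String) (x : String) :
    x ∈ (rs.foldl pvAltStep st).2 ↔ x ∈ st.2 ∨ ∃ rt ∈ rs, rt ≠ "" ∧
      ∃ i : Int, (1 ≤ i ∧ i < (PySem.Str.len rt : Int) + 1) ∧ x = PySem.Str.slice rt none (some i) := by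
  induction rs generalizing st with
  | nil => simp
  | cons rt rs ih =>
    rw [List.foldl_cons, ih]
    by_cases h : rt = ""
    · rw [show pvAltStep st rt = st from by simp [pvAltStep, h]]
      simp only [List.mem_cons]
      constructor
      · rintro (hx | ⟨rt', hm, hne, hi⟩)
        · exact Or.inl hx
        · exact Or.inr ⟨rt', Or.inr hm, hne, hi⟩
      · rintro (hx | ⟨rt', (rfl | hm), hne, hi⟩)
        · exact Or.inl hx
        · exact absurd h hne
        · exact Or.inr ⟨rt', hm, hne, hi⟩
    · rw [show (pvAltStep st rt).2 =
          (PySem.List.pyRange 1 ((PySem.Str.len rt : Int) + 1) 1).foldl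
            (fun p i => PySem.Set.add p (PySem.Str.slice rt none (some i))) st.2
        from by simp [pvAltStep, h]]
      rw [PySem.Set.mem_foldl_add]
      simp only [PySem.List.mem_pyRange_one, List.mem_cons]
      constructor
      · rintro ((hx | ⟨i, hi, rfl⟩) | ⟨rt', hm, hne, i, hi, rfl⟩)
        · tauto
        · exact Or.inr ⟨rt, Or.inl rfl, h, i, hi, rfl⟩
        · exact Or.inr ⟨rt', Or.inr hm, hne, i, hi, rfl⟩
      · rintro (hx | ⟨rt', (rfl | hm), hne, i, hi, rfl⟩)
        · tauto
        · exact Or.inl (Or.inr ⟨i, hi, rfl⟩)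
        · exact Or.inr ⟨rt', hm, hne, i, hi, rfl⟩

-- for nonempty t: t occurs among the slices rt[:i] iff t.toList is a prefix of rt.toList
theorem pv_slice_prefix_iff (t rt : String) (ht : t ≠ "") :
    (∃ i : Int, (1 ≤ i ∧ i < (PySem.Str.len rt : Int) + 1) ∧ t = PySem.Str.slice rt none (some i))
      ↔ t.toList <+: rt.toList := by
  constructor
  · rintro ⟨i, ⟨h1, _⟩, rfl⟩
    rw [pv_slice_toList rt i (by omega)]
    exact List.take_prefix _ _
  · intro hp
    refine ⟨(t.toList.length : Int), ⟨?_, ?_⟩, ?_⟩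
    · have h0 : 0 < t.toList.length := List.length_pos_iff.mpr ((pv_ne_empty_iff t).mp ht)
      omega
    · have := hp.length_le
      simp only [PySem.Str.len_eq]
      omega
    · rw [← String.toList_inj, pv_slice_toList rt _ (by positivity)]
      simp only [Int.toNat_natCast]
      exact List.prefix_iff_eq_take.mp hp

-- any slice t[:i], 1 ≤ i ≤ len t, is a nonempty prefix of t
theorem pv_slice_of_t_prefix (t : String) (i : Int) (h1 : 1 ≤ i) :
    (PySem.Str.slice t none (some i)).toList <+: t.toList := by
  rw [pv_slice_toList t i (by omega)]
  exact List.take_prefix _ _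

theorem is_refuted_py_spec : Claim_equal_is_refuted_py := by
  intro es rs _
  unfold Spec_is_refuted_py
  rw [Bool.eq_iff_iff]
  simp only [is_refuted_py, is_refuted_py_alt, List.any_eq_true, Bool.and_eq_true,
    Bool.or_eq_true, Bool.not_eq_eq_eq_not, Bool.not_true, beq_eq_false_iff_ne]
  constructor
  · -- A true → B true
    rintro ⟨t, htm, htne, rt, hrm, hrne, hsw⟩
    simp only [PySem.Str.startswith_eq, PySem.Chars.startswith_iff] at hsw
    refine ⟨t, htm, htne, ?_⟩
    rcases hsw with hrt_t | ht_rt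
    · -- rt is a prefix of t: the cut t[:len rt] is in the refuted set
      right
      simp only [PySem.List.mem_pyRange_one]
      have h0 : 0 < rt.toList.length := List.length_pos_iff.mpr ((pv_ne_empty_iff rt).mp hrne)
      refine ⟨(rt.toList.length : Int), ⟨by omega, ?_⟩, ?_⟩
      · have := hrt_t.length_le
        simp only [PySem.Str.len_eq]
        omega
      · rw [PySem.Set.contains_iff, pv_mem_fst]
        right
        have heq : PySem.Str.slice t none (some (rt.toList.length : Int)) = rt := by
          rw [← String.toList_inj, pv_slice_toList t _ (by positivity)]
          simp only [Int.toNat_natCast]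
          exact (List.prefix_iff_eq_take.mp hrt_t).symm
        rw [heq]
        exact ⟨hrm, hrne⟩
    · -- t is a prefix of rt: t is in the prefixes set
      left
      rw [PySem.Set.contains_iff, pv_mem_snd]
      exact Or.inr ⟨rt, hrm, hrne, (pv_slice_prefix_iff t rt htne).mpr ht_rt⟩
  · -- B true → A true
    rintro ⟨t, htm, htne, hcase⟩
    refine ⟨t, htm, htne, ?_⟩
    rcases hcase with hpref | hcut
    · rw [PySem.Set.contains_iff, pv_mem_snd] at hpref
      rcases hpref with h | ⟨rt, hm, hne, hi⟩
      · simp [PySem.Set.empty] at h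
      · refine ⟨rt, hm, hne, ?_⟩
        have hp := (pv_slice_prefix_iff t rt htne).mp hi
        simp only [PySem.Str.startswith_eq, PySem.Chars.startswith_iff]
        tauto
    · simp only [PySem.List.mem_pyRange_one] at hcut
      obtain ⟨i, ⟨h1, _⟩, hc⟩ := hcut
      rw [PySem.Set.contains_iff, pv_mem_fst] at hc
      rcases hc with h | ⟨hm, hne⟩
      · simp [PySem.Set.empty] at h
      · refine ⟨_, hm, hne, ?_⟩
        have hp := pv_slice_of_t_prefix t i h1
        simp only [PySem.Str.startswith_eq, PySem.Chars.startswith_iff]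
        tauto
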